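-- pv_equiv track=rewrite | github.com/ahalon/prg-basics | mock-test2/p10.py | f
-- ===== SOURCE A (Python) =====
-- def f(array):
--     min_value = array[0][0]
--     min_row = 0
--     min_col = 0
--
--     for i in range(len(array)):
--         for j in range(len(array[i])):
--             if array[i][j] < min_value:
--                 min_value = array[i][j]
--                 min_row = i
--                 min_col = j
--
--     return min_row == min_col
-- ===== SOURCE B (Python) =====
-- def f(array):
--     flat = [(i, j, v) for i, row in enumerate(array) for j, v in enumerate(row)]
--     m = min([v for (_, _, v) in flat])
--     for (i, j, v) in flat:
--         if v == m:
--             return i == j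
-- ===== Notes on version B (the rewrite author's own statement) =====
-- stated objective: alternative
-- what changed: Instead of A's single combined pass that tracks the running minimum together with its position, B flattens the array with coordinates, takes the minimum of the values, and then returns i == j for the first coordinate whose value equals that minimum.
import Mathlib
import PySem

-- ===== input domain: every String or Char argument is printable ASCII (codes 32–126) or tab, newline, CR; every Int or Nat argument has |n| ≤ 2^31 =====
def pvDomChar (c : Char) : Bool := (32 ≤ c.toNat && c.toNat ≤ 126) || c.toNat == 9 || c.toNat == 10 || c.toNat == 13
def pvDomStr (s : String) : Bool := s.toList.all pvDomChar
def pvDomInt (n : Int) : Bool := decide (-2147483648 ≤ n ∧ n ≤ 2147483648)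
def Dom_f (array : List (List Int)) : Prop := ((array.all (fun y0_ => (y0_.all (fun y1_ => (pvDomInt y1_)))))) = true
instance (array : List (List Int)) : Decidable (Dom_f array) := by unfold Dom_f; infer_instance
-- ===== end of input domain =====

-- B is an alternative decomposition: flatten with coordinates, take the minimum of the values,
-- return i == j for its first occurrence (equal to A's result on every input where A returns).

-- ===== PORT A =====
-- the whole tracking loop, state (min_value, min_row, min_col)
def pvScan (array : List (List Int)) : Int × Int × Int :=
  (PySem.List.pyRange 0 (array.length : Int) 1).foldl (fun (st : Int × Int × Int) i =>
    (PySem.List.pyRange 0 ((PySem.List.pyGetD array i []).length : Int) 1).foldl (fun st j =>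
      if PySem.List.pyGetD (PySem.List.pyGetD array i []) j 0 < st.1
      then (PySem.List.pyGetD (PySem.List.pyGetD array i []) j 0, i, j)
      else st) st)
    (PySem.List.pyGetD (PySem.List.pyGetD array 0 []) 0 0, 0, 0)

def f (array : List (List Int)) : Bool :=
  (pvScan array).2.1 == (pvScan array).2.2

-- ===== PORT B =====
-- flat = [(i, j, v) for i, row in enumerate(array) for j, v in enumerate(row)]
def pvFlat (array : List (List Int)) : List (Int × Int × Int) :=
  (PySem.List.enumerate array 0).flatMap
    (fun p => (PySem.List.enumerate p.2 0).map (fun q => (p.1, q.1, q.2)))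

-- for (i, j, v) in flat: if v == m: return i == j
def pvFind : List (Int × Int × Int) → Int → Option Bool
  | [], _ => none
  | t :: rest, m => if t.2.2 == m then some (t.1 == t.2.1) else pvFind rest m

-- m = min([...]); Python raises ValueError on an empty list, excluded by Pre_ (.getD unreachable there)
def f_alt (array : List (List Int)) : Bool :=
  (pvFind (pvFlat array)
    ((PySem.List.min? ((pvFlat array).map (fun t => t.2.2)) (fun x => x)).getD 0)).getD false

-- ===== PRECONDITION & SPEC =====
-- A raises IndexError on array[0][0] exactly when the array is empty or its first row is empty.
def Pre_f (array : List (List Int)) : Prop := array.getD 0 [] ≠ []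
instance (array : List (List Int)) : Decidable (Pre_f array) := by unfold Pre_f; infer_instance

def pvWitness_f : List (List Int) := [[3, 1], [0, 2]]

def Spec_f (array : List (List Int)) (out : Bool) : Prop := out = f_alt array
instance (array : List (List Int)) (out : Bool) : Decidable (Spec_f array out) := by unfold Spec_f; infer_instance

-- ===== CLAIM (what is proved, stated in full; the proofs are below) =====
def Claim_equal_f : Prop := ∀ (array : List (List Int)), Dom_f array → Pre_f array → Spec_f array (f array)

-- ===== LEMMAS AND PROOFS =====

-- A's element step on a flattened (i, j, v) stream
def pvStep (st : Int × Int × Int) (t : Int × Int × Int) : Int × Int × Int :=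
  if t.2.2 < st.1 then (t.2.2, t.1, t.2.1) else st

theorem pv_foldl_congr {α σ : Type} (l : List α) (g h : σ → α → σ) (init : σ)
    (H : ∀ st, ∀ a ∈ l, g st a = h st a) : l.foldl g init = l.foldl h init := by
  induction l generalizing init with
  | nil => rfl
  | cons a t ih =>
    rw [List.foldl_cons, List.foldl_cons, H init a (List.mem_cons_self ..)]
    exact ih _ (fun st b hb => H st b (List.mem_cons_of_mem _ hb))

theorem pv_foldl_enum_pyRange {α σ : Type} (xs : List α) (d : α) (H : σ → Int × α → σ) (init : σ) :
    (PySem.List.enumerate xs 0).foldl H init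
      = (PySem.List.pyRange 0 (xs.length : Int) 1).foldl
          (fun st j => H st (j, PySem.List.pyGetD xs j d)) init := by
  rw [PySem.List.enumerate_eq_map_pyRange xs d, List.foldl_map]
  simp [PySem.List.len]

theorem pv_foldl_flatMap {α β σ : Type} (h : α → List β) (g : σ → β → σ)
    (l : List α) (init : σ) :
    (l.flatMap h).foldl g init = l.foldl (fun st a => (h a).foldl g st) init := by
  induction l generalizing init with
  | nil => rfl
  | cons a t ih => simp [List.flatMap_cons, List.foldl_append, ih]

-- A's nested fold over ranges equals a single fold of pvStep over pvFlat
theorem pv_scan_eq_flat (array : List (List Int)) (init : Int × Int × Int) :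
    (PySem.List.pyRange 0 (array.length : Int) 1).foldl (fun (st : Int × Int × Int) i =>
      (PySem.List.pyRange 0 ((PySem.List.pyGetD array i []).length : Int) 1).foldl (fun st j =>
        if PySem.List.pyGetD (PySem.List.pyGetD array i []) j 0 < st.1
        then (PySem.List.pyGetD (PySem.List.pyGetD array i []) j 0, i, j)
        else st) st) init
      = (pvFlat array).foldl pvStep init := by
  rw [pvFlat, pv_foldl_flatMap,
    pv_foldl_enum_pyRange array []
      (fun st p => ((PySem.List.enumerate p.2 0).map (fun q => (p.1, q.1, q.2))).foldl pvStep st) init]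
  apply pv_foldl_congr
  intro st i _
  rw [List.foldl_map,
    pv_foldl_enum_pyRange (PySem.List.pyGetD array i []) 0
      (fun st q => pvStep st (i, q.1, q.2)) st]
  apply pv_foldl_congr
  intro st j _
  simp [pvStep]

theorem pv_flat_cons (v0 : Int) (r0 : List Int) (rest : List (List Int)) :
    pvFlat ((v0 :: r0) :: rest)
      = (0, 0, v0) ::
        ((PySem.List.enumerate r0 1).map (fun q => ((0 : Int), q.1, q.2)) ++
          (PySem.List.enumerate rest 1).flatMap
            (fun p => (PySem.List.enumerate p.2 0).map (fun q => (p.1, q.1, q.2)))) := by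
  simp [pvFlat, PySem.List.enumerate_cons]

-- invariant of A's combined pass over the flattened stream
theorem pv_core (l : List (Int × Int × Int)) (v0 : Int) (p : Int × Int) :
    (l.foldl pvStep (v0, p)).1 ≤ v0 ∧
    (∀ t ∈ l, (l.foldl pvStep (v0, p)).1 ≤ t.2.2) ∧
    ((l.foldl pvStep (v0, p)).1 = v0 ∨ ∃ t ∈ l, (l.foldl pvStep (v0, p)).1 = t.2.2) ∧
    ((l.foldl pvStep (v0, p)).1 < v0 →
      pvFind l (l.foldl pvStep (v0, p)).1
        = some ((l.foldl pvStep (v0, p)).2.1 == (l.foldl pvStep (v0, p)).2.2)) ∧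
    (¬ (l.foldl pvStep (v0, p)).1 < v0 → l.foldl pvStep (v0, p) = (v0, p)) := by
  induction l generalizing v0 p with
  | nil => simp
  | cons t rest ih =>
    by_cases h : t.2.2 < v0
    · have step : pvStep (v0, p) t = (t.2.2, t.1, t.2.1) := by simp [pvStep, h]
      obtain ⟨h1, h2, h3, h4, h5⟩ := ih t.2.2 (t.1, t.2.1)
      rw [List.foldl_cons, step]
      set r := rest.foldl pvStep (t.2.2, t.1, t.2.1) with hr
      have hrv : r.1 < v0 := lt_of_le_of_lt h1 h
      refine ⟨le_of_lt hrv, ?_, ?_, ?_, ?_⟩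
      · intro u hu
        rcases List.mem_cons.mp hu with rfl | hu
        · exact h1
        · exact h2 u hu
      · rcases h3 with h3 | ⟨u, hu, h3⟩
        · exact Or.inr ⟨t, by simp, h3⟩
        · exact Or.inr ⟨u, by simp [hu], h3⟩
      · intro _
        by_cases hlt : r.1 < t.2.2
        · have hne : ¬ (t.2.2 == r.1) = true := by simp; omega
          simp only [pvFind, hne]
          exact h4 hlt
        · have hru := h5 hlt
          have hv : r.1 = t.2.2 := by rw [hru]
          simp only [pvFind, hv, beq_self_eq_true, if_true]
          rw [hru]
      · intro hc; omega
    · have step : pvStep (v0, p) t = (v0, p) := by simp [pvStep, h]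
      obtain ⟨h1, h2, h3, h4, h5⟩ := ih v0 p
      rw [List.foldl_cons, step]
      set r := rest.foldl pvStep (v0, p) with hr
      refine ⟨h1, ?_, ?_, ?_, h5⟩
      · intro u hu
        rcases List.mem_cons.mp hu with rfl | hu
        · omega
        · exact h2 u hu
      · rcases h3 with h3 | ⟨u, hu, h3⟩
        · exact Or.inl h3
        · exact Or.inr ⟨u, by simp [hu], h3⟩
      · intro hlt
        have hne : ¬ (t.2.2 == r.1) = true := by simp; omega
        simp only [pvFind, hne]
        exact h4 hlt

-- ===== VERDICT (by name: the statement is the Claim_ definition above) =====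
theorem f_spec : Claim_equal_f := by
  intro array _ hpre
  obtain ⟨rest, v0, r0', rfl⟩ :
      ∃ rest v0 r0', array = (v0 :: r0') :: rest := by
    match array, hpre with
    | (v :: r') :: rest, _ => exact ⟨rest, v, r', rfl⟩
  unfold Spec_f f f_alt pvScan
  have hv0 : PySem.List.pyGetD (PySem.List.pyGetD ((v0 :: r0') :: rest) 0 []) 0 0 = v0 := by
    simp [PySem.List.pyGetD_zero_cons]
  rw [hv0, pv_scan_eq_flat]
  set flat := pvFlat ((v0 :: r0') :: rest) with hflat
  have htl := pv_flat_cons v0 r0' rest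
  rw [← hflat] at htl
  set r := flat.foldl pvStep (v0, 0, 0) with hrdef
  obtain ⟨h1, h2, h3, h4, h5⟩ := pv_core flat v0 (0, 0)
  rw [← hrdef] at h1 h2 h3 h4 h5
  have hv0mem : v0 ∈ flat.map (fun t => t.2.2) := by
    rw [htl]; exact List.mem_cons_self ..
  obtain ⟨m, hm⟩ : ∃ m, PySem.List.min? (flat.map (fun t => t.2.2)) (fun x => x) = some m := by
    rcases h : PySem.List.min? (flat.map (fun t => t.2.2)) (fun x => x) with _ | m
    · exact absurd ((PySem.List.min?_eq_none_iff _ _).mp h)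
        (by rw [htl]; simp)
    · exact ⟨m, h⟩
  have hmmem : m ∈ flat.map (fun t => t.2.2) := PySem.List.min?_mem hm
  have hmle : ∀ y ∈ flat.map (fun t => t.2.2), m ≤ y := PySem.List.min?_isMin hm
  have hm_eq_r1 : m = r.1 := by
    have hr_le_m : r.1 ≤ m := by
      rcases List.mem_map.mp hmmem with ⟨t, ht, rfl⟩
      exact h2 t ht
    have hm_le_r : m ≤ r.1 := by
      rcases h3 with h3 | ⟨t, ht, h3⟩
      · rw [h3]; exact hmle v0 hv0mem
      · rw [h3]; exact hmle t.2.2 (List.mem_map.mpr ⟨t, ht, rfl⟩)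
    omega
  rw [hm, Option.getD_some, hm_eq_r1]
  by_cases hlt : r.1 < v0
  · rw [h4 hlt, Option.getD_some]
  · have hr : r = (v0, 0, 0) := h5 hlt
    have hfind : pvFind flat r.1 = some true := by
      rw [htl]
      have : r.1 = v0 := by rw [hr]
      rw [this]
      simp [pvFind]
    rw [hfind, Option.getD_some, hr]
    simp
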